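-- pv_equiv track=rewrite | github.com/MapManagement/AoC2022 | day5/main.py | read_crane
-- ===== SOURCE A (Python) =====
-- def read_crane(crane: str):
--     stacks = []
--     container_length = 4
--     crane_lines = crane.splitlines()
--     number_of_stack = (len(crane_lines[0]) + 1) // container_length
--
--     for _ in range(number_of_stack):
--         stacks.append([])
--
--     position = 0
--     for line in crane_lines:
--         position = 0
--         while position < len(line):
--             container: str = line[position:position + container_length]
--             if container.startswith("["):
--                 stacks[position // container_length].append(line[position:position + container_length - 1])
--
--             position += container_length
--
--     return stacks
-- ===== SOURCE B (Python) =====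
-- def read_crane(crane: str):
--     lines = crane.splitlines()
--     number_of_stack = (len(lines[0]) + 1) // 4
--     stacks = [[] for _ in range(number_of_stack)]
--     for line in lines:
--         for j, ch in enumerate(line):
--             if ch == '[' and j % 4 == 0:
--                 stacks[j // 4].append(line[j:j + 3])
--     return stacks
-- ===== Notes on version B (the rewrite author's own statement) =====
-- stated objective: alternative
-- what changed: B drops A's while-loop that steps through each line in 4-char window slices tested with startswith; instead it scans every character once with enumerate and appends when the character itself is '[' at a column-aligned (j % 4 == 0) index, deriving the stack index arithmetically.
import Mathlib
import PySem

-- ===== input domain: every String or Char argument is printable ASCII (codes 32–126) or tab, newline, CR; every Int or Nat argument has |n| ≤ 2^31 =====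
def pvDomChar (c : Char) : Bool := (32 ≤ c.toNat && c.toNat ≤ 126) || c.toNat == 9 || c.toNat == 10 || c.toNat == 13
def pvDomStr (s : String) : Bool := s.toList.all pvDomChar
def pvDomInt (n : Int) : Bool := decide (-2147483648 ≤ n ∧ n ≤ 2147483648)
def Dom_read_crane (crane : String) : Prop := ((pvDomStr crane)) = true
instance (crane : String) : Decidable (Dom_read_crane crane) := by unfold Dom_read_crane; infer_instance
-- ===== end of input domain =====

-- B replaces A's while-loop over 4-char window slices (startswith test) by a single
-- per-character enumerate scan testing ch == '[' at column-aligned indices (alternative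
-- decomposition, same cost); equal return value wherever Python A returns (Pre_).

-- ===== PORT A =====
-- inner while-loop of A: walks `line` in steps of 4, appending the bracketed 3-char slice to
-- stack position//4.  Python raises IndexError when position//4 is out of range; Pre_ excludes
-- that, the port's List.modify is a no-op there.
def craneLineA (line : List Char) (pos : Nat) (stks : List (List String)) : List (List String) :=
  if _h : pos < line.length then
    let container := PySem.List.slice line (some (pos : Int)) (some ((pos + 4 : Nat) : Int))
    let stks' :=
      if PySem.Chars.startswith container ['['] then
        stks.modify (pos / 4)
          (fun st => st ++ [String.ofList (PySem.List.slice line (some (pos : Int)) (some ((pos + 3 : Nat) : Int)))])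
      else stks
    craneLineA line (pos + 4) stks'
  else stks
termination_by line.length - pos
decreasing_by omega

def read_crane (crane : String) : List (List String) :=
  let craneLines := PySem.Str.splitlines crane
  -- Python's crane_lines[0] raises IndexError on an empty list; Pre_ excludes that, default "" used
  let numberOfStack := (PySem.Int.floordiv (PySem.Str.len (PySem.List.pyGetD craneLines 0 "") + 1) 4).toNat
  let stks := (List.range numberOfStack).foldl (fun s _ => s ++ [([] : List String)]) []
  craneLines.foldl (fun s line => craneLineA line.toList 0 s) stks

-- ===== PORT B =====
-- B: scan each line once with enumerate; a '[' character at a column-aligned index j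
-- (j % 4 == 0) contributes line[j:j+3] to stack j // 4.  Python raises IndexError when
-- j // 4 is out of range (same inputs as A); Pre_ excludes that, List.modify is a no-op.
def read_crane_alt (crane : String) : List (List String) :=
  let lines := PySem.Str.splitlines crane
  let numberOfStack := (PySem.Int.floordiv (PySem.Str.len (PySem.List.pyGetD lines 0 "") + 1) 4).toNat
  let stks0 := (List.range numberOfStack).map (fun _ => ([] : List String))
  lines.foldl (fun s line =>
    (PySem.List.enumerate line.toList 0).foldl (fun s p =>
      if p.2 == '[' && PySem.Int.mod p.1 4 == 0 then
        s.modify (PySem.Int.floordiv p.1 4).toNat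
          (fun st => st ++ [String.ofList (PySem.List.slice line.toList (some p.1) (some (p.1 + 3)))])
      else s) s) stks0

-- ===== PRECONDITION & SPEC =====
-- Pre_ = exactly the inputs where Python A returns: the drawing has at least one line, and no
-- line carries a '[' at a 4-char column index ≥ (len(first line)+1)//4 (there A — and B — raise
-- IndexError).
def Pre_read_crane (crane : String) : Prop :=
  let lines := PySem.Str.splitlines crane
  lines ≠ [] ∧
  ∀ line ∈ lines, ∀ i ∈ List.range line.toList.length,
    PySem.Chars.startswith
        (PySem.List.slice line.toList (some ((4 * i : Nat) : Int)) (some ((4 * i + 4 : Nat) : Int))) ['['] = true →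
    (i : Int) < PySem.Int.floordiv (PySem.Str.len (PySem.List.pyGetD lines 0 "") + 1) 4
instance (crane : String) : Decidable (Pre_read_crane crane) := by unfold Pre_read_crane; infer_instance

def pvWitness_read_crane : String := "[A] [B]"

def Spec_read_crane (crane : String) (out : List (List String)) : Prop := out = read_crane_alt crane
instance (crane : String) (out : List (List String)) : Decidable (Spec_read_crane crane out) := by unfold Spec_read_crane; infer_instance

-- ===== CLAIM (what is proved, stated in full; the proofs are below) =====
def Claim_equal_read_crane : Prop := ∀ (crane : String), Dom_read_crane crane → Pre_read_crane crane → Spec_read_crane crane (read_crane crane)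

-- ===== LEMMAS AND PROOFS =====

-- the per-column test and 3-char slice, the shared vocabulary of the proofs
def colQ (l : List Char) (i : Nat) : Bool :=
  PySem.Chars.startswith (PySem.List.slice l (some ((4 * i : Nat) : Int)) (some ((4 * i + 4 : Nat) : Int))) ['[']
def colC (l : List Char) (i : Nat) : String :=
  String.ofList (PySem.List.slice l (some ((4 * i : Nat) : Int)) (some ((4 * i + 3 : Nat) : Int)))
-- the contribution of the lines to stack i (column-major reading)
def colAll (lines : List String) (i : Nat) : List String :=
  lines.flatMap (fun line => if colQ line.toList i = true then [colC line.toList i] else [])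

theorem colQ_false_of_ge (l : List Char) (i : Nat) (h : l.length ≤ 4 * i) : colQ l i = false := by
  unfold colQ
  rw [Bool.eq_false_iff]
  intro hq
  have hlen := ((PySem.Chars.startswith_iff _ _).mp hq).length_le
  rw [PySem.List.slice_natCast] at hlen
  simp at hlen
  omega

-- colQ holds exactly when the character at the column-aligned index is '['
theorem colQ_iff_get (l : List Char) (i : Nat) :
    colQ l i = true ↔ ∃ h : 4 * i < l.length, l[4 * i] = '[' := by
  unfold colQ
  rw [PySem.Chars.startswith_iff, PySem.List.slice_natCast,
    show 4 * i + 4 - 4 * i = 4 from by omega]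
  constructor
  · rintro ⟨t, ht⟩
    have h1 : ((l.drop (4 * i)).take 4).head? = some '[' := by rw [← ht]; rfl
    rw [List.head?_take, List.head?_drop] at h1
    simp only [if_neg (by omega : ¬ (4 = 0))] at h1
    exact List.getElem?_eq_some_iff.mp h1
  · rintro ⟨hlt, hc⟩
    rw [List.drop_eq_getElem_cons hlt]
    simp [List.take_succ_cons, hc]


theorem craneLineA_step (l : List Char) (j : Nat) (s : List (List String)) (h : 4 * j < l.length) :
    craneLineA l (4 * j) s
      = craneLineA l (4 * j + 4)
          (if colQ l j = true then s.modify j (fun st => st ++ [colC l j]) else s) := by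
  rw [craneLineA, dif_pos h]
  rw [show 4 * j / 4 = j from by omega]
  rfl

theorem craneLineA_eq (l : List Char) (j : Nat) (s : List (List String)) :
    craneLineA l (4 * j) s
      = s.mapIdx (fun i st => st ++ (if j ≤ i ∧ colQ l i = true then [colC l i] else [])) := by
  by_cases h : 4 * j < l.length
  · rw [craneLineA_step l j s h, show 4 * j + 4 = 4 * (j + 1) from by ring,
      craneLineA_eq l (j + 1)]
    by_cases hq : colQ l j = true
    · rw [if_pos hq]
      apply List.ext_getElem
      · simp
      · intro i hi1 hi2
        have hil : i < s.length := by simpa using hi2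
        simp only [List.getElem_mapIdx]
        rw [List.getElem_modify]
        by_cases hij : j = i
        · subst hij
          rw [if_pos rfl, if_neg (fun hx => absurd hx.1 (by omega)), if_pos ⟨le_refl _, hq⟩]
          simp
        · rw [if_neg hij]
          by_cases hci : colQ l i = true
          · simp only [hci, and_true]
            split_ifs <;> first | rfl | omega
          · simp [hci]
    · rw [if_neg hq]
      apply List.ext_getElem
      · simp
      · intro i hi1 hi2
        simp only [List.getElem_mapIdx]
        by_cases hci : colQ l i = true
        · simp only [hci, and_true]
          split_ifs with h1 h2 h2 <;>
            first
            | rfl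
            | omega
            | (exfalso
               have : j = i := by omega
               subst this
               exact hq hci)
        · simp [hci]
  · rw [craneLineA, dif_neg h]
    apply List.ext_getElem
    · simp
    · intro i hi1 hi2
      simp only [List.getElem_mapIdx]
      split_ifs with h1
      · exfalso
        have := colQ_false_of_ge l i (by omega)
        simp_all
      · simp
termination_by l.length - 4 * j
decreasing_by omega

theorem craneLineA_zero (l : List Char) (s : List (List String)) :
    craneLineA l 0 s = s.mapIdx (fun i st => st ++ (if colQ l i = true then [colC l i] else [])) := by
  have := craneLineA_eq l 0 s
  simpa using this

-- B's inner enumerate fold, characterised over the suffix starting at k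
theorem enumFoldB_eq (l : List Char) (k : Nat) (s : List (List String)) :
    (PySem.List.enumerate (l.drop k) (k : Int)).foldl (fun s p =>
      if p.2 == '[' && PySem.Int.mod p.1 4 == 0 then
        s.modify (PySem.Int.floordiv p.1 4).toNat
          (fun st => st ++ [String.ofList (PySem.List.slice l (some p.1) (some (p.1 + 3)))])
      else s) s
      = s.mapIdx (fun i st => st ++ (if k ≤ 4 * i ∧ colQ l i = true then [colC l i] else [])) := by
  by_cases h : k < l.length
  · rw [List.drop_eq_getElem_cons h, PySem.List.enumerate_cons, List.foldl_cons]
    have hrec := enumFoldB_eq l (k + 1)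
    have hmod : PySem.Int.mod (k : Int) 4 = ((k % 4 : Nat) : Int) := by
      exact_mod_cast PySem.Int.mod_natCast k 4
    by_cases hfire : l[k] = '[' ∧ k % 4 = 0
    · obtain ⟨hc, hm⟩ := hfire
      rw [if_pos (by simp [hc]; exact_mod_cast Nat.dvd_of_mod_eq_zero hm)]
      rw [show ((k : Int) + 1) = ((k + 1 : Nat) : Int) from by push_cast; ring, hrec]
      have hdiv : (PySem.Int.floordiv (k : Int) 4).toNat = k / 4 := by
        have h4 : PySem.Int.floordiv (k : Int) 4 = ((k / 4 : Nat) : Int) := by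
          exact_mod_cast PySem.Int.floordiv_natCast k 4
        rw [h4]; exact Int.toNat_natCast _
      rw [hdiv]
      have hk4 : 4 * (k / 4) = k := by omega
      have hcc : String.ofList (PySem.List.slice l (some (k : Int)) (some ((k : Int) + 3))) = colC l (k / 4) := by
        unfold colC
        congr 2
        · rw [hk4]
        · rw [show ((k : Int) + 3) = ((k + 3 : Nat) : Int) from by push_cast; ring]
          congr 1
          omega
      rw [hcc]
      apply List.ext_getElem
      · simp
      · intro i hi1 hi2
        have hil : i < s.length := by simpa using hi2
        simp only [List.getElem_mapIdx]
        rw [List.getElem_modify]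
        by_cases hij : k / 4 = i
        · subst hij
          rw [if_pos rfl]
          have hq : colQ l (k / 4) = true :=
            (colQ_iff_get l (k / 4)).mpr ⟨by omega, by simp only [hk4]; exact hc⟩
          rw [if_neg (fun hx => absurd hx.1 (by omega)), if_pos ⟨by omega, hq⟩]
          simp
        · rw [if_neg hij]
          by_cases hci : colQ l i = true
          · simp only [hci, and_true]
            split_ifs <;> first | rfl | omega
          · simp [hci]
    · rw [if_neg (by
        rcases (not_and_or.mp hfire) with hnc | hnm
        · simp [hnc]
        · simp
          intro _ hd
          have h4k : (4:Nat) ∣ k := by exact_mod_cast hd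
          exact hnm (by omega))]
      rw [show ((k : Int) + 1) = ((k + 1 : Nat) : Int) from by push_cast; ring, hrec]
      apply List.ext_getElem
      · simp
      · intro i hi1 hi2
        simp only [List.getElem_mapIdx]
        by_cases hci : colQ l i = true
        · simp only [hci, and_true]
          split_ifs with h1 h2 h2 <;>
            first
            | rfl
            | omega
            | (exfalso
               have hk4i : k = 4 * i := by omega
               obtain ⟨hlt, hc⟩ := (colQ_iff_get l i).mp hci
               subst hk4i
               exact hfire ⟨hc, by omega⟩)
        · simp [hci]
  · rw [List.drop_eq_nil_of_le (by omega), PySem.List.enumerate_nil, List.foldl_nil]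
    apply List.ext_getElem
    · simp
    · intro i hi1 hi2
      simp only [List.getElem_mapIdx]
      split_ifs with h1
      · exfalso
        obtain ⟨hlt, _⟩ := (colQ_iff_get l i).mp h1.2
        omega
      · simp
termination_by l.length - k
decreasing_by omega

theorem craneLineB_zero (l : List Char) (s : List (List String)) :
    (PySem.List.enumerate l 0).foldl (fun s p =>
      if p.2 == '[' && PySem.Int.mod p.1 4 == 0 then
        s.modify (PySem.Int.floordiv p.1 4).toNat
          (fun st => st ++ [String.ofList (PySem.List.slice l (some p.1) (some (p.1 + 3)))])
      else s) s
      = s.mapIdx (fun i st => st ++ (if colQ l i = true then [colC l i] else [])) := by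
  have := enumFoldB_eq l 0 s
  simpa using this

-- shared outer-loop shape: any per-line step with the mapIdx characterisation folds to colAll
theorem foldl_lines (f : List (List String) → String → List (List String))
    (hf : ∀ s line, f s line = s.mapIdx (fun i st => st ++ (if colQ line.toList i = true then [colC line.toList i] else [])))
    (lines : List String) (s : List (List String)) :
    lines.foldl f s = s.mapIdx (fun i st => st ++ colAll lines i) := by
  induction lines generalizing s with
  | nil =>
      apply List.ext_getElem <;> simp [colAll, List.getElem_mapIdx]
  | cons l ls ih =>
      rw [List.foldl_cons, hf, ih]
      apply List.ext_getElem
      · simp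
      · intro i hi1 hi2
        simp [List.getElem_mapIdx, colAll, List.flatMap_cons]

theorem read_crane_eq_alt (crane : String) : read_crane crane = read_crane_alt crane := by
  simp only [read_crane, read_crane_alt]
  rw [PySem.List.foldl_append_singleton_eq_map,
    foldl_lines _ (fun s line => craneLineA_zero line.toList s),
    foldl_lines _ (fun s line => craneLineB_zero line.toList s),
    List.nil_append]

-- ===== VERDICT (by name: the statement is the Claim_ definition above) =====
theorem read_crane_spec : Claim_equal_read_crane := by
  intro crane _ _
  unfold Spec_read_crane
  exact read_crane_eq_alt crane
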